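-- pv_equiv track=rewrite | github.com/miliar/Code_Jam_Webscraper | solutions_python/Problem_199/3726.py | check
-- ===== SOURCE A (Python) =====
-- INF = 99999999999999
--
-- def check(string, length):
-- 	if len(string) == length:
-- 		if string == '+'*length:
-- 			return 0
-- 		elif string == '-'*length:
-- 			return 1
-- 		else:
-- 			return INF
-- 	else:
-- 		if string[0] == '+':
-- 			return check(string[1:], length)
-- 		else:
-- 			temp = list(string)
-- 			for i in range(1, length):
-- 				if string[i] == '+':
-- 					temp[i] = '-'
-- 				else:
-- 					temp[i] = '+'
-- 			return check(''.join(temp[1:]), length) + 1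
-- ===== SOURCE B (Python) =====
-- INF = 99999999999999
--
-- def flipped(s):
--     return ''.join('-' if c == '+' else '+' for c in s)
--
-- def check(string, length):
--     # Iterative pancake simulation: slide past '+' heads; on a '-' head flip the
--     # whole front window of size `length` (its head becomes '+') and drop it.
--     s = string
--     flips = 0
--     while len(s) != length:
--         if s[0] == '+':
--             s = s[1:]
--         else:
--             s = flipped(s[:length])[1:] + s[length:]
--             flips += 1
--     if s == '+' * length:
--         extra = 0
--     elif s == '-' * length:
--         extra = 1
--     else:
--         extra = INF
--     return flips + extra
-- ===== Notes on version B (the rewrite author's own statement) =====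
-- stated objective: simpler
-- what changed: Replaces A's tail recursion (which rebuilds each flipped string via an index-assignment loop over a fresh list copy and adds 1 on the way back up the call stack) with an explicit while-loop carrying the shrinking string and a running flip counter, expressing each flip step as 'flip the front window of size length, drop its head' via slicing and a character map, and returning flips + remaining cost in one place; …
-- outside the precondition, e.g. on check('--', 0): A returns 2, B does not finish within the time limit; on check('++', 3): A raises IndexError, B raises IndexError; on check('+-', -1): A raises IndexError, B does not finish within the time limit
import Mathlib
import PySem

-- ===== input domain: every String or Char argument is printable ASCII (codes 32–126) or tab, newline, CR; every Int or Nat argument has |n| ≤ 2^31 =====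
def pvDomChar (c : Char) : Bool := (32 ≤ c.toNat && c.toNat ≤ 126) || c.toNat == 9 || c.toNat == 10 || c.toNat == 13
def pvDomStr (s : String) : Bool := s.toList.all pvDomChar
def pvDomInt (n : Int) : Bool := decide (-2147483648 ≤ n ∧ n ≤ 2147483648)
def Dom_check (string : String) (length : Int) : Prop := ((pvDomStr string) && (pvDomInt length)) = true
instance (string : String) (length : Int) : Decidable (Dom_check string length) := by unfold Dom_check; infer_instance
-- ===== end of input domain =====

-- B replaces A's tail recursion (rebuild each flipped string by index assignment into a
-- fresh list copy, add 1 on the way back up the call stack) with an explicit while-loop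
-- carrying the shrinking string and a running flip counter (objective: simpler / iterative decomposition).

-- ===== PORT A =====

def pvINF : Int := 99999999999999

-- the for-loop 'for i in range(1, length): temp[i] = flip(string[i])' over temp = list(string)
def checkFlip (s : List Char) (length : Int) : List Char :=
  (PySem.List.pyRange 1 length 1).foldl
    (fun t i => t.set i.toNat (if PySem.List.pyGet? s i = some '+' then '-' else '+')) s

-- fuel = the list's length (the string shrinks by one character per call); it only
-- guards totality and never runs out on the calls `check` makes
def checkAux (fuel : Nat) (l : List Char) (length : Int) : Int :=
  if (l.length : Int) = length then
    if l = List.replicate length.toNat '+' then 0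
    else if l = List.replicate length.toNat '-' then 1
    else pvINF
  else
    match fuel, l with
    | _, [] => 0  -- Python raises IndexError at string[0] here; excluded by Pre_check
    | 0, _ => 0
    | fuel + 1, c :: rest =>
      if c = '+' then checkAux fuel rest length
      else checkAux fuel (checkFlip (c :: rest) length).tail length + 1

def check (string : String) (length : Int) : Int :=
  checkAux string.toList.length string.toList length

-- ===== PORT B =====

-- flipped(s): ''.join('-' if c == '+' else '+' for c in s)
def flipChar (c : Char) : Char := if c = '+' then '-' else '+'

-- the while-loop of Source B; fuel = the list's length (s shrinks by one per iteration), a totality guard only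
def checkAltAux (fuel : Nat) (s : List Char) (length : Int) (flips : Int) : Int :=
  if (s.length : Int) ≠ length then
    match fuel, s with
    | _, [] => flips  -- Python raises IndexError at s[0] here; excluded by Pre_check
    | 0, _ => flips
    | fuel + 1, c :: rest =>
      if c = '+' then checkAltAux fuel rest length flips
      else
        -- s = flipped(s[:length])[1:] + s[length:]
        checkAltAux fuel
          (((PySem.List.slice (c :: rest) none (some length)).map flipChar).tail
            ++ PySem.List.slice (c :: rest) (some length) none)
          length (flips + 1)
  else
    flips +
      (if s = List.replicate length.toNat '+' then 0
       else if s = List.replicate length.toNat '-' then 1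
       else pvINF)

def check_alt (string : String) (length : Int) : Int :=
  checkAltAux string.toList.length string.toList length 0

-- ===== PRECONDITION & SPEC =====
-- Pre_check excludes length > len(string) (and negative length), where A raises IndexError, and
-- also length ≤ 0 — a degenerate flipper size outside the problem's domain: flipping a zero-size
-- window changes nothing, so B's loop does not terminate there, while A accidentally returns the
-- count of '-' characters.
def Pre_check (string : String) (length : Int) : Prop :=
  1 ≤ length ∧ length ≤ PySem.Str.len string
instance (string : String) (length : Int) : Decidable (Pre_check string length) := by
  unfold Pre_check; infer_instance

def pvWitness_check : String × Int := ("+-+", 2)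

def Spec_check (string : String) (length : Int) (out : Int) : Prop := out = check_alt string length
instance (string : String) (length : Int) (out : Int) : Decidable (Spec_check string length out) := by unfold Spec_check; infer_instance

-- ===== CLAIM (what is proved, stated in full; the proofs are below) =====
def Claim_equal_check : Prop := ∀ (string : String) (length : Int), Dom_check string length → Pre_check string length → Spec_check string length (check string length)

-- ===== LEMMAS AND PROOFS =====

theorem foldl_set_length (l : List Int) (f : Int → Char) :
    ∀ t : List Char, (l.foldl (fun t i => t.set i.toNat (f i)) t).length = t.length := by
  induction l with
  | nil => intro t; rfl
  | cons a l ih => intro t; simpa [List.foldl_cons] using ih (t.set a.toNat (f a))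

theorem checkFlip_length (s : List Char) (length : Int) :
    (checkFlip s length).length = s.length := by
  unfold checkFlip
  exact foldl_set_length _ (fun i => if PySem.List.pyGet? s i = some '+' then '-' else '+') s

theorem checkFlip_getElem (s : List Char) (m : Nat) (j : Nat)
    (hj : j < (checkFlip s (m : Int)).length) (hj' : j < s.length) :
    (checkFlip s (m : Int))[j] =
      if 1 ≤ j ∧ j < m then flipChar s[j] else s[j] := by
  induction m with
  | zero =>
    have h0 : checkFlip s ((0 : Nat) : Int) = s := by
      unfold checkFlip
      rw [PySem.List.pyRange_one_eq_nil (by omega), List.foldl_nil]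
    rw [List.getElem_of_eq h0 hj, if_neg (by omega)]
  | succ m ih =>
    by_cases hm1 : 1 ≤ m
    · have hsplit : checkFlip s ((m + 1 : Nat) : Int) =
          (checkFlip s (m : Int)).set m
            (if PySem.List.pyGet? s (m : Int) = some '+' then '-' else '+') := by
        unfold checkFlip
        rw [show ((m + 1 : Nat) : Int) = (m : Int) + 1 by push_cast; ring,
          PySem.List.pyRange_one_succ_right (by exact_mod_cast hm1), List.foldl_append]
        simp [List.foldl_cons]
      have hlen : (checkFlip s (m : Int)).length = s.length := checkFlip_length s _
      rw [List.getElem_of_eq hsplit hj, List.getElem_set]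
      by_cases hjm : m = j
      · subst hjm
        rw [if_pos rfl, if_pos (⟨hm1, Nat.lt_succ_self m⟩ : 1 ≤ m ∧ m < m + 1)]
        rw [PySem.List.pyGet?_natCast, List.getElem?_eq_getElem hj']
        split_ifs <;> simp_all [flipChar]
      · rw [if_neg hjm, ih (by omega)]
        simp only [show (1 ≤ j ∧ j < m) ↔ (1 ≤ j ∧ j < m + 1) from by omega]
    · -- m = 0: both ranges range(1,0+1)=[] and range(1,1)=[] are empty
      have hm0 : m = 0 := by omega
      subst hm0
      have h1 : checkFlip s ((0 + 1 : Nat) : Int) = s := by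
        unfold checkFlip
        rw [PySem.List.pyRange_one_eq_nil (by omega), List.foldl_nil]
      rw [List.getElem_of_eq h1 hj, if_neg (by omega)]

-- the list A recurses on, as take/drop of the tail
theorem flip_agree (c : Char) (rest : List Char) (m : Nat) (hm : 1 ≤ m) :
    (checkFlip (c :: rest) (m : Int)).tail =
      (rest.take (m - 1)).map flipChar ++ rest.drop (m - 1) := by
  have hlen : (checkFlip (c :: rest) (m : Int)).length = rest.length + 1 :=
    checkFlip_length _ _
  apply List.ext_getElem
  · simp [List.length_tail, hlen]; omega
  · intro j hj1 hj2
    have hjr : j < rest.length := by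
      simp [List.length_tail, hlen] at hj1; omega
    rw [List.getElem_tail]
    rw [checkFlip_getElem (c :: rest) m (j + 1) (by omega) (by simp; omega)]
    by_cases hjm : j < m - 1
    · rw [if_pos (by omega)]
      rw [List.getElem_append_left (by simp; omega)]
      simp [List.getElem_take, List.getElem_cons_succ]
    · rw [if_neg (by omega)]
      rw [List.getElem_append_right (by simp; omega)]
      simp only [List.getElem_cons_succ, List.getElem_drop]
      congr 1
      simp [List.length_take]
      omega

-- the list B's flip step recurses on equals the list A recurses on
theorem flip_step_agree (c : Char) (rest : List Char) (m : Nat) (hm : 1 ≤ m) :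
    ((PySem.List.slice (c :: rest) none (some (m : Int))).map flipChar).tail
        ++ PySem.List.slice (c :: rest) (some (m : Int)) none =
      (checkFlip (c :: rest) (m : Int)).tail := by
  rw [PySem.List.slice_to_natCast, PySem.List.slice_from_natCast, flip_agree c rest m hm]
  obtain ⟨k, rfl⟩ : ∃ k, m = k + 1 := ⟨m - 1, by omega⟩
  simp [List.take_succ_cons, List.drop_succ_cons]

theorem checkAux_eq (fuel : Nat) : ∀ (s : List Char) (n flips : Int),
    s.length = fuel → 1 ≤ n → n ≤ (s.length : Int) →
    checkAltAux fuel s n flips = checkAux fuel s n + flips := by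
  induction fuel with
  | zero =>
    intro s n flips hsm hn1 hns
    -- s = [] and 1 ≤ n ≤ 0: impossible
    match s, hsm with
    | [], _ => simp at hns; omega
  | succ fuel ih =>
    intro s n flips hsm hn1 hns
    rw [checkAux.eq_def, checkAltAux.eq_def]
    by_cases hbase : (s.length : Int) = n
    · rw [if_pos hbase, if_neg (by omega : ¬ ((s.length : Int) ≠ n))]
      split_ifs <;> ring
    · have hlt : n < (s.length : Int) := lt_of_le_of_ne hns (fun h => hbase h.symm)
      rw [if_neg hbase, if_pos (by omega : (s.length : Int) ≠ n)]
      match s, hsm with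
      | c :: rest, hsm =>
        simp only [List.length_cons] at hsm hlt
        dsimp only
        by_cases hc : c = '+'
        · rw [if_pos hc, if_pos hc]
          exact ih rest n flips (by omega) hn1 (by omega)
        · rw [if_neg hc, if_neg hc]
          obtain ⟨nn, rfl⟩ : ∃ nn : Nat, n = (nn : Int) := ⟨n.toNat, by omega⟩
          have hnn1 : 1 ≤ nn := by omega
          rw [flip_step_agree c rest nn hnn1, flip_agree c rest nn hnn1]
          have hrec := ih ((rest.take (nn - 1)).map flipChar ++ rest.drop (nn - 1))
            (nn : Int) (flips + 1)
            (by simp only [List.length_append, List.length_take, List.length_map,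
                  List.length_drop]; omega)
            hn1
            (by simp only [List.length_append, List.length_take, List.length_map,
                  List.length_drop]; omega)
          rw [hrec]
          ring

theorem check_eq_alt (string : String) (length : Int)
    (h : Pre_check string length) : check string length = check_alt string length := by
  obtain ⟨h1, h2⟩ := h
  rw [PySem.Str.len_eq] at h2
  rw [check, check_alt,
    checkAux_eq string.toList.length string.toList length 0 rfl h1 h2]
  ring

-- ===== VERDICT (by name: the statement is the Claim_ definition above) =====
theorem check_spec : Claim_equal_check := by
  intro string length _ hpre
  unfold Spec_check
  exact check_eq_alt string length hpre
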